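-- pv_equiv track=rewrite | github.com/vkeller/modulo-gybe | 2M/prog/hacking/code/codage_decodage.py | calculer_alphabet
-- ===== SOURCE A (Python) =====
-- def calculer_alphabet(clef):
--     alphabet_clair = 'abcdefghijklmnopqrstuvwxyz'
--     alphabet_code = ''
--     for c in alphabet_clair :
--         index = alphabet_clair.index(c)
--         index = ((index+clef)%26)
--         alphabet_code = alphabet_code + alphabet_clair[index]
--
--     return alphabet_code
-- ===== SOURCE B (Python) =====
-- def calculer_alphabet(clef):
--     alphabet = 'abcdefghijklmnopqrstuvwxyz'
--     shift = clef % 26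
--     return alphabet[shift:] + alphabet[:shift]
-- ===== Notes on version B (the rewrite author's own statement) =====
-- stated objective: idiomatic
-- what changed: Replaced the per-letter loop (with its redundant .index scan and per-character modulo) by a single closed-form rotation: shift = clef % 26, result = alphabet[shift:] + alphabet[:shift].
import Mathlib
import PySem

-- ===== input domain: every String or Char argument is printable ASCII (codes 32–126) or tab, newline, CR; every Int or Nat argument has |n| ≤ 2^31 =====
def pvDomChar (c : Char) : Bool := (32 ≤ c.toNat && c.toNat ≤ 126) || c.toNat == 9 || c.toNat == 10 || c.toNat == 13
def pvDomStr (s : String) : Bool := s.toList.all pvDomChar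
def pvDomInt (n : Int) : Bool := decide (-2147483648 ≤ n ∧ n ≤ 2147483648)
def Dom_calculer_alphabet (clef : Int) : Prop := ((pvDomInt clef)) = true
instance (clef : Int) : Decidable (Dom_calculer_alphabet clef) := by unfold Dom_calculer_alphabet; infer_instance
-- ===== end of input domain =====

-- B replaces A's per-letter loop by the closed-form rotation alphabet[clef % 26:] + alphabet[:clef % 26] (idiomatic; same cost class).

-- ===== PORT A =====
-- the fixed alphabet, as a char list (Python strings are ported through List Char)
def pvAlpha : List Char := "abcdefghijklmnopqrstuvwxyz".toList

-- literal port of A: fold over the alphabet; .index scan, (index+clef) % 26, append the indexed char.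
-- The pyGet? lookup is always `some` (the index is a remainder mod 26); the `none` arm (Python: IndexError) is unreachable.
def calculer_alphabet (clef : Int) : String :=
  String.ofList (pvAlpha.foldl (fun acc c =>
    let index : Int := ((PySem.List.index? pvAlpha c).getD 0 : Nat)
    let index : Int := PySem.Int.mod (index + clef) 26
    match PySem.List.pyGet? pvAlpha index with
    | some ch => acc ++ [ch]
    | none => acc) [])

-- ===== PORT B =====
def calculer_alphabet_alt (clef : Int) : String :=
  let shift : Int := PySem.Int.mod clef 26
  String.ofList (PySem.List.slice pvAlpha (some shift) none ++ PySem.List.slice pvAlpha none (some shift))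

-- ===== PRECONDITION & SPEC =====
def Spec_calculer_alphabet (clef : Int) (out : String) : Prop := out = calculer_alphabet_alt clef
instance (clef : Int) (out : String) : Decidable (Spec_calculer_alphabet clef out) := by unfold Spec_calculer_alphabet; infer_instance

-- ===== CLAIM (what is proved, stated in full; the proofs are below) =====
def Claim_equal_calculer_alphabet : Prop := ∀ (clef : Int), Dom_calculer_alphabet clef → Spec_calculer_alphabet clef (calculer_alphabet clef)

-- ===== LEMMAS AND PROOFS =====

-- A depends on clef only through clef % 26
theorem calculer_alphabet_mod (clef : Int) :
    calculer_alphabet clef = calculer_alphabet (clef % 26) := by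
  unfold calculer_alphabet
  refine congrArg String.ofList (congrArg (fun f => List.foldl f ([] : List Char) pvAlpha) ?_)
  funext acc c
  have h : PySem.Int.mod (((PySem.List.index? pvAlpha c).getD 0 : Nat) + clef) 26
      = PySem.Int.mod (((PySem.List.index? pvAlpha c).getD 0 : Nat) + clef % 26) 26 := by
    rw [PySem.Int.mod_eq_emod_of_pos (by norm_num), PySem.Int.mod_eq_emod_of_pos (by norm_num)]
    omega
  simp only [h]

-- B depends on clef only through clef % 26
theorem calculer_alphabet_alt_mod (clef : Int) :
    calculer_alphabet_alt clef = calculer_alphabet_alt (clef % 26) := by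
  unfold calculer_alphabet_alt
  have h : PySem.Int.mod clef 26 = PySem.Int.mod (clef % 26) 26 := by
    rw [PySem.Int.mod_eq_emod_of_pos (by norm_num), PySem.Int.mod_eq_emod_of_pos (by norm_num)]
    omega
  simp only [h]

-- the 26 residues, checked by computation
theorem calculer_alphabet_small : ∀ k : Nat, k < 26 →
    calculer_alphabet (k : Int) = calculer_alphabet_alt (k : Int) := by decide

-- ===== VERDICT (by name: the statement is the Claim_ definition above) =====
theorem calculer_alphabet_spec : Claim_equal_calculer_alphabet := by
  intro clef _
  unfold Spec_calculer_alphabet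
  rw [calculer_alphabet_mod, calculer_alphabet_alt_mod]
  have h0 : 0 ≤ clef % 26 := Int.emod_nonneg _ (by norm_num)
  have h1 : clef % 26 < 26 := Int.emod_lt_of_pos _ (by norm_num)
  have hk : clef % 26 = ((clef % 26).toNat : Int) := (Int.toNat_of_nonneg h0).symm
  rw [hk]
  exact calculer_alphabet_small _ (by omega)
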